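-- pv_equiv track=rewrite | github.com/MrBrantCode/unitest_baseline | mut_generate/mist_train_cf/cf_19045/solution.py | replace_pattern_with_lessons
-- ===== SOURCE A (Python) =====
-- def replace_pattern_with_lessons(pattern, text):
--     result = ""
--     pattern_lower = pattern.lower()
--     i = 0
--
--     while i < len(text):
--         if text[i:i+len(pattern)].lower() == pattern_lower:
--             if text[i].isupper():
--                 result += "LESSONS"
--             elif text[i].islower():
--                 result += "lessons"
--             else:
--                 result += "Lessons"
--             i += len(pattern)
--         else:
--             result += text[i]
--             i += 1
--
--     return result
-- ===== SOURCE B (Python) =====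
-- def replace_pattern_with_lessons(pattern, text):
--     tl = text.lower()
--     pl = pattern.lower()
--     parts = []
--     i = 0
--     while True:
--         j = tl.find(pl, i)
--         if j < 0:
--             parts.append(text[i:])
--             break
--         parts.append(text[i:j])
--         c = text[j]
--         if c.isupper():
--             parts.append("LESSONS")
--         elif c.islower():
--             parts.append("lessons")
--         else:
--             parts.append("Lessons")
--         i = j + len(pattern)
--     return "".join(parts)
-- ===== Notes on version B (the rewrite author's own statement) =====
-- stated objective: faster
-- what changed: A rescans the text one position at a time, building a lowered length-m slice and comparing it at every index; B lowers pattern and text once and jumps between matches with str.find, copying the untouched gaps wholesale.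
-- outside the precondition, e.g. on replace_pattern_with_lessons('', ''): A returns '', B raises IndexError
import Mathlib
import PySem

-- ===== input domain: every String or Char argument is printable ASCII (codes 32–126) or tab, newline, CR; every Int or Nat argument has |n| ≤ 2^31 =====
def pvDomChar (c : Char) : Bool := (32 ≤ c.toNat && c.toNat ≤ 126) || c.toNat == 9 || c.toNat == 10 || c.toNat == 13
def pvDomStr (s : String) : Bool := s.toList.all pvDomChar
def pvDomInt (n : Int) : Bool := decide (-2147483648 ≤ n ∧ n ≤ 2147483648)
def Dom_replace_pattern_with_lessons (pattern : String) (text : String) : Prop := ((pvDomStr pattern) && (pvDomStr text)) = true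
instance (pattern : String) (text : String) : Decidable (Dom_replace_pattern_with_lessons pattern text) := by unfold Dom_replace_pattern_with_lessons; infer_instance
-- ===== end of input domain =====

-- B replaces A's per-position slice-and-compare scan by one lowered copy of the text and
-- repeated str.find jumps between matches (objective: faster).

-- ===== PORT A =====
-- shared helper: the cased replacement chosen from the first character of the match
def pvCaseRepl (c : Char) : List Char :=
  if PySem.Chars.isupper c then "LESSONS".toList
  else if PySem.Chars.islower c then "lessons".toList
  else "Lessons".toList

-- the while-loop of A; `text[i:i+len(pattern)]` = (text.drop i).take plen (PySem.List.slice_natCast_add)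
def pvALoop (pl : List Char) (plen : Nat) (text : List Char) (i : Nat) : List Char :=
  if h : i < text.length then
    if PySem.Chars.lower ((text.drop i).take plen) = pl then
      pvCaseRepl (text[i]) ++
        (if h0 : plen = 0 then [] else pvALoop pl plen text (i + plen))
        -- plen = 0: Python's loop never advances (diverges); totality guard, outside Pre_
    else
      text[i] :: pvALoop pl plen text (i + 1)
  else []
termination_by text.length - i
decreasing_by all_goals omega

def replace_pattern_with_lessons (pattern : String) (text : String) : String :=
  String.ofList (pvALoop (PySem.Chars.lower pattern.toList) pattern.toList.length text.toList 0)

-- ===== PORT B =====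
-- the find-driven loop of B; `tl.find(pl, i)` is PySem.Chars.findFrom, `text[i:j]` = (drop i).take (j-i)
def pvBLoop (text tl pl : List Char) (i : Nat) : List Char :=
  let j := PySem.Chars.findFrom tl pl (i : Int)
  if j < 0 then text.drop i
  else
    (text.drop i).take (j.toNat - i) ++ pvCaseRepl ((PySem.List.pyGet? text j).getD ' ') ++
      (if h : i < j.toNat + pl.length ∧ i ≤ text.length then pvBLoop text tl pl (j.toNat + pl.length) else [])
      -- the guard only certifies termination; with pl ≠ [] it always holds
termination_by text.length + 1 - i
decreasing_by omega

def replace_pattern_with_lessons_alt (pattern : String) (text : String) : String :=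
  String.ofList (pvBLoop text.toList (PySem.Chars.lower text.toList) (PySem.Chars.lower pattern.toList) 0)

-- ===== PRECONDITION & SPEC =====
-- Pre_ excludes the empty pattern, on which both loops fail to advance: A diverges for nonempty
-- text (and B too), and on ("", "") A returns "" while B's find-based scan raises IndexError.
def Pre_replace_pattern_with_lessons (pattern : String) (text : String) : Prop := pattern ≠ ""
instance (pattern : String) (text : String) : Decidable (Pre_replace_pattern_with_lessons pattern text) := by unfold Pre_replace_pattern_with_lessons; infer_instance

def pvWitness_replace_pattern_with_lessons : String × String := ("ab", "xABy aB")

def Spec_replace_pattern_with_lessons (pattern : String) (text : String) (out : String) : Prop := out = replace_pattern_with_lessons_alt pattern text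
instance (pattern : String) (text : String) (out : String) : Decidable (Spec_replace_pattern_with_lessons pattern text out) := by unfold Spec_replace_pattern_with_lessons; infer_instance

-- ===== CLAIM (what is proved, stated in full; the proofs are below) =====
def Claim_equal_replace_pattern_with_lessons : Prop := ∀ (pattern : String) (text : String), Dom_replace_pattern_with_lessons pattern text → Pre_replace_pattern_with_lessons pattern text → Spec_replace_pattern_with_lessons pattern text (replace_pattern_with_lessons pattern text)

-- ===== LEMMAS AND PROOFS =====

lemma pv_lower_slice (text : List Char) (i m : Nat) :
    PySem.Chars.lower ((text.drop i).take m) = ((PySem.Chars.lower text).drop i).take m := by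
  simp [PySem.Chars.lower, List.map_take, List.map_drop]

lemma pv_length_lower (s : List Char) : (PySem.Chars.lower s).length = s.length := by
  simp [PySem.Chars.lower]

lemma pv_match_iff (text pl : List Char) (i : Nat) :
    PySem.Chars.lower ((text.drop i).take pl.length) = pl ↔ pl <+: (PySem.Chars.lower text).drop i := by
  rw [pv_lower_slice, List.prefix_iff_eq_take]
  exact ⟨fun h => h.symm, fun h => h.symm⟩

lemma pv_findFrom_end (s sub : List Char) (hsub : sub ≠ []) :
    PySem.Chars.findFrom s sub (s.length : Int) = -1 := by
  rw [PySem.Chars.findFrom_natCast_eq_neg_one_iff s sub s.length le_rfl]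
  simp [List.drop_length, hsub]

lemma pv_findFrom_self (s sub : List Char) (i : Nat) (hi : i ≤ s.length)
    (h : sub <+: s.drop i) : PySem.Chars.findFrom s sub (i : Int) = i := by
  have hne : PySem.Chars.findFrom s sub (i : Int) ≠ -1 := by
    intro hc
    rw [PySem.Chars.findFrom_natCast_eq_neg_one_iff s sub i hi] at hc
    exact hc h.isInfix
  obtain ⟨h1, h2, h3⟩ := PySem.Chars.findFrom_natCast_spec s sub i hi hne
  have h0 : (0 : Int) ≤ PySem.Chars.findFrom s sub (i : Int) := le_trans (by omega) h1
  have : ¬ i < (PySem.Chars.findFrom s sub (i : Int)).toNat := fun hlt => h3 i le_rfl hlt h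
  omega
  
lemma pv_findFrom_succ (s sub : List Char) (i : Nat) (hi : i < s.length)
    (h : ¬ sub <+: s.drop i) :
    PySem.Chars.findFrom s sub (i : Int) = PySem.Chars.findFrom s sub ((i + 1 : Nat) : Int) := by
  by_cases hne : PySem.Chars.findFrom s sub ((i + 1 : Nat) : Int) = -1
  · rw [hne, PySem.Chars.findFrom_natCast_eq_neg_one_iff s sub i (by omega)]
    rw [PySem.Chars.findFrom_natCast_eq_neg_one_iff s sub (i + 1) (by omega)] at hne
    intro hinf
    obtain ⟨t, u, htu⟩ := hinf
    -- an occurrence in s.drop i is at some offset k; k = 0 contradicts h, k ≥ 1 gives one in s.drop (i+1)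
    have hocc : ∃ k, sub <+: (s.drop i).drop k := by
      refine ⟨t.length, ?_⟩
      rw [← htu, List.append_assoc, List.drop_left]
      exact List.prefix_append sub u
    obtain ⟨k, hk⟩ := hocc
    rcases Nat.eq_zero_or_pos k with hk0 | hk0
    · exact h (by simpa [hk0] using hk)
    · apply hne
      have heq : (s.drop i).drop k = (s.drop (i + 1)).drop (k - 1) := by
        rw [List.drop_drop, List.drop_drop]
        congr 1
        omega
      rw [heq] at hk
      exact hk.isInfix.trans (List.drop_suffix _ _).isInfix
  · obtain ⟨h1, h2, h3⟩ := PySem.Chars.findFrom_natCast_spec s sub (i + 1) (by omega) hne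
    set j := PySem.Chars.findFrom s sub ((i + 1 : Nat) : Int) with hj
    have h0 : (0 : Int) ≤ j := le_trans (by omega) h1
    have hne' : PySem.Chars.findFrom s sub (i : Int) ≠ -1 := by
      intro hc
      rw [PySem.Chars.findFrom_natCast_eq_neg_one_iff s sub i (by omega)] at hc
      have heq : s.drop j.toNat = (s.drop i).drop (j.toNat - i) := by
        rw [List.drop_drop]
        congr 1
        omega
      rw [heq] at h2
      exact hc (h2.isInfix.trans (List.drop_suffix _ _).isInfix)
    obtain ⟨g1, g2, g3⟩ := PySem.Chars.findFrom_natCast_spec s sub i (by omega) hne'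
    set j' := PySem.Chars.findFrom s sub (i : Int) with hj'
    have g0 : (0 : Int) ≤ j' := le_trans (by positivity) g1
    -- j'.toNat ≠ i since there is no match at i
    have hji : j'.toNat ≠ i := fun hc => h (hc ▸ g2)
    have hji' : i + 1 ≤ j'.toNat := by omega
    have hle1 : ¬ j'.toNat < j.toNat := fun hlt => h3 j'.toNat hji' hlt g2
    have hle2 : ¬ j.toNat < j'.toNat := fun hlt => g3 j.toNat (by omega) hlt h2
    omega

lemma pv_prefix_drop_bound {sub s : List Char} {j : Nat} (h : sub <+: s.drop j) :
    j + sub.length ≤ s.length ∨ s.length ≤ j := by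
  have := h.length_le
  rw [List.length_drop] at this
  omega

-- the loop equivalence: A's per-position scan equals B's find-jumping scan
lemma pv_main (pl : List Char) (hpl : pl ≠ []) (text : List Char) (i : Nat) (hi : i ≤ text.length) :
    pvALoop pl pl.length text i = pvBLoop text (PySem.Chars.lower text) pl i := by
  induction hn : text.length - i using Nat.strong_induction_on generalizing i with
  | _ n IH =>
  subst hn
  set tl := PySem.Chars.lower text with htl
  have hlen : tl.length = text.length := pv_length_lower text
  have hm : 0 < pl.length := List.length_pos_iff.mpr hpl
  by_cases hlt : i < text.length
  · by_cases hmatch : pl <+: tl.drop i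
    · -- match at i: both emit the replacement and continue at i + pl.length
      have hbound : i + pl.length ≤ text.length := by
        rcases pv_prefix_drop_bound hmatch with hb | hb
        · omega
        · omega
      have hff : PySem.Chars.findFrom tl pl (i : Int) = i :=
        pv_findFrom_self tl pl i (by omega) hmatch
      rw [pvALoop, pvBLoop]
      simp only [hff, hlt, dif_pos]
      rw [if_pos ((pv_match_iff text pl i).mpr hmatch)]
      have hnn : ¬ ((i : Int) < 0) := by omega
      rw [if_neg hnn]
      simp only [Int.toNat_natCast, Nat.sub_self, List.take_zero, List.nil_append]
      rw [dif_neg (by omega), dif_pos ⟨by omega, by omega⟩]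
      rw [IH (text.length - (i + pl.length)) (by omega) (i + pl.length) (by omega) rfl]
      congr 1
      -- text[i] versus text[j] via pyGet?
      simp [PySem.List.pyGet?, PySem.List.pyIdx?, hlt]
    · -- no match at i: A emits text[i]; B's find skips position i
      have hcond : ¬ PySem.Chars.lower ((text.drop i).take pl.length) = pl :=
        fun hc => hmatch ((pv_match_iff text pl i).mp hc)
      have hff : PySem.Chars.findFrom tl pl (i : Int) =
          PySem.Chars.findFrom tl pl ((i + 1 : Nat) : Int) :=
        pv_findFrom_succ tl pl i (by omega) hmatch
      have hdrop : text.drop i = text[i] :: text.drop (i + 1) := List.drop_eq_getElem_cons hlt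
      have hB : pvBLoop text tl pl i = text[i] :: pvBLoop text tl pl (i + 1) := by
        by_cases hneg : PySem.Chars.findFrom tl pl ((i + 1 : Nat) : Int) < 0
        · -- no further match: both sides are tail slices
          rw [pvBLoop]
          conv_rhs => rw [pvBLoop]
          simp only [hff]
          rw [if_pos hneg, if_pos hneg, hdrop]
        · -- next match at j ≥ i + 1: peel text[i] off the gap slice
          have hne : PySem.Chars.findFrom tl pl ((i + 1 : Nat) : Int) ≠ -1 := by omega
          obtain ⟨h1, h2, h3⟩ := PySem.Chars.findFrom_natCast_spec tl pl (i + 1) (by omega) hne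
          set j := PySem.Chars.findFrom tl pl ((i + 1 : Nat) : Int) with hj
          have hji : i + 1 ≤ j.toNat := by omega
          rw [pvBLoop]
          conv_rhs => rw [pvBLoop]
          simp only [hff, ← hj]
          rw [if_neg hneg, if_neg hneg]
          rw [dif_pos ⟨by omega, by omega⟩, dif_pos ⟨by omega, by omega⟩]
          rw [hdrop]
          have htake : (text[i] :: text.drop (i + 1)).take (j.toNat - i) =
              text[i] :: (text.drop (i + 1)).take (j.toNat - (i + 1)) := by
            have : j.toNat - i = (j.toNat - (i + 1)) + 1 := by omega
            rw [this, List.take_succ_cons]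
          rw [htake, List.cons_append, List.cons_append]
      rw [pvALoop]
      simp only [hlt, dif_pos]
      rw [if_neg hcond]
      rw [IH (text.length - (i + 1)) (by omega) (i + 1) (by omega) rfl, hB]
  · -- i = text.length: both loops stop
    have hieq : i = text.length := by omega
    subst hieq
    have hF : PySem.Chars.findFrom tl pl (text.length : Int) = -1 := by
      rw [← hlen]; exact pv_findFrom_end tl pl hpl
    rw [pvALoop, pvBLoop]
    simp [hF, List.drop_length]

-- ===== VERDICT (by name: the statement is the Claim_ definition above) =====
theorem replace_pattern_with_lessons_spec : Claim_equal_replace_pattern_with_lessons := by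
  intro pattern text _ hpre
  unfold Spec_replace_pattern_with_lessons
  unfold replace_pattern_with_lessons replace_pattern_with_lessons_alt
  have hpl : PySem.Chars.lower pattern.toList ≠ [] := by
    intro h
    apply hpre
    have hnil : pattern.toList = [] := by
      have := congrArg List.length h
      rw [pv_length_lower] at this
      exact List.length_eq_zero_iff.mp this
    exact String.toList_eq_nil_iff.mp hnil
  have hlen : pattern.toList.length = (PySem.Chars.lower pattern.toList).length :=
    (pv_length_lower pattern.toList).symm
  rw [hlen]
  exact congrArg String.ofList
    (pv_main (PySem.Chars.lower pattern.toList) hpl text.toList 0 (Nat.zero_le _))
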